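-- pv_equiv track=rewrite | github.com/AerdnaNami/citation_evaluation | evaluate_unsupp.py | token_char_offsets_from_space_join
-- ===== SOURCE A (Python) =====
-- def token_char_offsets_from_space_join(tokens):
--     """
--     If you form text = " ".join(tokens), compute each token's (start,end) char offsets in that text.
--     """
--     offsets = []
--     pos = 0
--     for i, tok in enumerate(tokens):
--         if i > 0:
--             pos += 1  # the space
--         start = pos
--         end = start + len(tok)
--         offsets.append((start, end))
--         pos = end
--     return offsets
-- ===== SOURCE B (Python) =====
-- def token_char_offsets_from_space_join(tokens):
--     # Pass 1: prefix-sum table of token lengths (prefix[i] = total chars of tokens[:i]).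
--     prefix = [0]
--     total = 0
--     for t in tokens:
--         total += len(t)
--         prefix.append(total)
--     # Pass 2: closed-form per index: i earlier spaces shift everything by i.
--     return [(prefix[i] + i, prefix[i + 1] + i) for i in range(len(tokens))]
-- ===== Notes on version B (the rewrite author's own statement) =====
-- stated objective: alternative
-- what changed: Replaces the single running-offset accumulator loop with two passes: a prefix-sum table of token lengths, then an index-based closed-form (prefix[i]+i, prefix[i+1]+i) comprehension.
import Mathlib
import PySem

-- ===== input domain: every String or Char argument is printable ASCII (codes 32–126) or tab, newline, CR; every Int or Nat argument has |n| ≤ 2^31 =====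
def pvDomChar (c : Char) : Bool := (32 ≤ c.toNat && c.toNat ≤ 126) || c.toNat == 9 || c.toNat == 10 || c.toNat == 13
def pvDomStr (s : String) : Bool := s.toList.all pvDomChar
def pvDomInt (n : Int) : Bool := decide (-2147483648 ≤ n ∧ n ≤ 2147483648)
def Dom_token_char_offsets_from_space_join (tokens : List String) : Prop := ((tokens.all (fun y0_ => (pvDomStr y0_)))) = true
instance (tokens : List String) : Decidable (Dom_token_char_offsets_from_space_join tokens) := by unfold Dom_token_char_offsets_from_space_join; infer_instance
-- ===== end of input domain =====

-- B replaces A's running-offset accumulator with a prefix-sum table of token lengths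
-- plus a closed-form per-index computation (alternative decomposition, same cost).


-- ===== PORT A =====
-- loop body of A: maybe advance over the space, record (start, end), carry pos = end
def pvStepA (st : List (Int × Int) × Int) (p : Int × String) : List (Int × Int) × Int :=
  let pos := if p.1 > 0 then st.2 + 1 else st.2
  let start := pos
  let e := start + PySem.Str.len p.2
  (st.1 ++ [(start, e)], e)

def token_char_offsets_from_space_join (tokens : List String) : List (Int × Int) :=
  ((PySem.List.enumerate tokens).foldl pvStepA ([], 0)).1

-- ===== PORT B =====
-- pass 1 body of B: extend the prefix-sum table with the running total
def pvStepB (st : List Int × Int) (t : String) : List Int × Int :=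
  let total := st.2 + PySem.Str.len t
  (st.1 ++ [total], total)

def token_char_offsets_from_space_join_alt (tokens : List String) : List (Int × Int) :=
  let pre := (tokens.foldl pvStepB ([0], 0)).1
  -- indices i and i+1 are always in range (pre has length n+1), so pyGetD's default 0 is never used
  (PySem.List.pyRange 0 tokens.length 1).map
    (fun i => (PySem.List.pyGetD pre i 0 + i, PySem.List.pyGetD pre (i + 1) 0 + i))

-- ===== PRECONDITION & SPEC =====
def Spec_token_char_offsets_from_space_join (tokens : List String) (out : List (Int × Int)) : Prop := out = token_char_offsets_from_space_join_alt tokens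
instance (tokens : List String) (out : List (Int × Int)) : Decidable (Spec_token_char_offsets_from_space_join tokens out) := by unfold Spec_token_char_offsets_from_space_join; infer_instance

-- ===== CLAIM (what is proved, stated in full; the proofs are below) =====
def Claim_equal_token_char_offsets_from_space_join : Prop := ∀ (tokens : List String), Dom_token_char_offsets_from_space_join tokens → Spec_token_char_offsets_from_space_join tokens (token_char_offsets_from_space_join tokens)

-- ===== LEMMAS AND PROOFS =====

/-- Reference: offsets of consecutive space-separated tokens starting at position `pos`. -/
def pvRef (pos : Int) : List String → List (Int × Int)
  | [] => []
  | t :: ts => (pos, pos + PySem.Str.len t) :: pvRef (pos + PySem.Str.len t + 1) ts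

/-- Partial sums of token lengths starting at `total` (leading `total` not included). -/
def pvScan (total : Int) : List String → List Int
  | [] => []
  | t :: ts => (total + PySem.Str.len t) :: pvScan (total + PySem.Str.len t) ts

theorem aLoop_eq (ts : List String) : ∀ (s : Int) (acc : List (Int × Int)) (pos : Int),
    1 ≤ s →
    ((PySem.List.enumerate ts s).foldl pvStepA (acc, pos)).1 = acc ++ pvRef (pos + 1) ts := by
  induction ts with
  | nil => intro s acc pos _; simp [PySem.List.enumerate_nil, pvRef]
  | cons t ts ih =>
    intro s acc pos hs
    rw [PySem.List.enumerate_cons, List.foldl_cons]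
    have hstep : pvStepA (acc, pos) (s, t) =
        (acc ++ [(pos + 1, pos + 1 + PySem.Str.len t)], pos + 1 + PySem.Str.len t) := by
      simp [pvStepA, if_pos (show s > 0 by omega)]
    rw [hstep, ih (s + 1) _ _ (by omega), pvRef]
    simp [List.append_assoc]

theorem a_eq_ref (tokens : List String) :
    token_char_offsets_from_space_join tokens = pvRef 0 tokens := by
  cases tokens with
  | nil => simp [token_char_offsets_from_space_join, PySem.List.enumerate_nil, pvRef]
  | cons t ts =>
    unfold token_char_offsets_from_space_join
    rw [PySem.List.enumerate_cons, List.foldl_cons]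
    have hstep : pvStepA ([], 0) ((0 : Int), t) =
        ([((0 : Int), PySem.Str.len t)], PySem.Str.len t) := by
      simp [pvStepA]
    rw [hstep, aLoop_eq ts (0 + 1) _ _ (by omega), pvRef]
    simp

theorem bPrefix_eq (ts : List String) : ∀ (pre : List Int) (total : Int),
    (ts.foldl pvStepB (pre, total)).1 = pre ++ pvScan total ts := by
  induction ts with
  | nil => intro pre total; simp [pvScan]
  | cons t ts ih =>
    intro pre total
    rw [List.foldl_cons]
    show (ts.foldl pvStepB (pre ++ [total + PySem.Str.len t], total + PySem.Str.len t)).1 = _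
    rw [ih, pvScan]
    simp [List.append_assoc]

theorem b_map_eq (ts : List String) : ∀ (c b : Int),
    (List.range ts.length).map
      (fun (k : Nat) => (PySem.List.pyGetD (c :: pvScan c ts) ((k : Int)) 0 + (b + (k : Int)),
                 PySem.List.pyGetD (c :: pvScan c ts) ((k : Int) + 1) 0 + (b + (k : Int)))) =
    pvRef (c + b) ts := by
  induction ts with
  | nil => intro c b; simp [pvRef]
  | cons t ts ih =>
    intro c b
    simp only [List.length_cons]
    rw [List.range_succ_eq_map, List.map_cons, List.map_map, pvRef]
    congr 1
    · have e0 : PySem.List.pyGetD (c :: pvScan c (t :: ts)) (((0 : Nat) : Int)) 0 = c := by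
        simp
      have e1 : PySem.List.pyGetD (c :: pvScan c (t :: ts)) (((0 : Nat) : Int) + 1) 0
          = c + PySem.Str.len t := by
        rw [show (((0 : Nat) : Int) + 1) = ((1 : Nat) : Int) by norm_num, PySem.List.pyGetD_natCast]
        simp [pvScan]
      simp only [e0, e1, Prod.mk.injEq]
      constructor <;> (push_cast; ring)
    · have hf : ((fun (k : Nat) => (PySem.List.pyGetD (c :: pvScan c (t :: ts)) ((k : Int)) 0 + (b + (k : Int)),
            PySem.List.pyGetD (c :: pvScan c (t :: ts)) ((k : Int) + 1) 0 + (b + (k : Int)))) ∘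
            (fun (k : Nat) => k + 1)) =
          (fun (k : Nat) => (PySem.List.pyGetD ((c + PySem.Str.len t) :: pvScan (c + PySem.Str.len t) ts) ((k : Int)) 0 + ((b + 1) + (k : Int)),
            PySem.List.pyGetD ((c + PySem.Str.len t) :: pvScan (c + PySem.Str.len t) ts) ((k : Int) + 1) 0 + ((b + 1) + (k : Int)))) := by
        funext k
        simp only [Function.comp_apply]
        rw [show (((k + 1 : Nat) : Int) + 1) = ((k + 2 : Nat) : Int) by push_cast; ring,
            show (((k : Nat) : Int) + 1) = ((k + 1 : Nat) : Int) by push_cast; ring]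
        simp only [PySem.List.pyGetD_natCast, pvScan,
          show (k + 2 : Nat) = (k + 1) + 1 from rfl, List.getD_cons_succ]
        simp only [Prod.mk.injEq]
        constructor <;> (push_cast; ring)
      rw [hf, ih (c + PySem.Str.len t) (b + 1)]
      congr 1
      ring

theorem b_eq_ref (tokens : List String) :
    token_char_offsets_from_space_join_alt tokens = pvRef 0 tokens := by
  unfold token_char_offsets_from_space_join_alt
  rw [bPrefix_eq]
  simp only [List.singleton_append]
  have hrange : PySem.List.pyRange 0 (tokens.length : Int) 1 =
      (List.range tokens.length).map (fun (k : Nat) => (k : Int)) := by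
    rw [PySem.List.pyRange_one]
    simp
  simp only [hrange, List.map_map]
  have hfun : ((fun i => (PySem.List.pyGetD (0 :: pvScan 0 tokens) i 0 + i,
        PySem.List.pyGetD (0 :: pvScan 0 tokens) (i + 1) 0 + i)) ∘ fun (k : Nat) => (k : Int)) =
      (fun (k : Nat) => (PySem.List.pyGetD ((0 : Int) :: pvScan 0 tokens) ((k : Int)) 0 + ((0 : Int) + (k : Int)),
        PySem.List.pyGetD ((0 : Int) :: pvScan 0 tokens) ((k : Int) + 1) 0 + ((0 : Int) + (k : Int)))) := by
    funext k
    simp only [Function.comp_apply, zero_add]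
  rw [hfun, b_map_eq tokens 0 0]
  norm_num

-- ===== VERDICT (by name: the statement is the Claim_ definition above) =====
theorem token_char_offsets_from_space_join_spec : Claim_equal_token_char_offsets_from_space_join := by
  intro tokens _
  unfold Spec_token_char_offsets_from_space_join
  rw [a_eq_ref, b_eq_ref]
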